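-- pv_equiv track=rewrite | github.com/shinyoung-angel/Algorithm_ | SWEA-3단계/반반.py | check
-- ===== SOURCE A (Python) =====
-- def check(s):
--
--     word_dict = {}
--     for alphabet in s:
--         if not word_dict.get(alphabet):
--             word_dict[alphabet] = 1
--         else:
--             word_dict[alphabet] += 1
--
--     if len(word_dict) == 2:
--         return 'Yes'
--     else:
--         return 'No'
-- ===== SOURCE B (Python) =====
-- def check(s):
--     t = sorted(s)
--     if not t:
--         distinct = 0
--     else:
--         distinct = 1 + sum(1 for a, b in zip(t, t[1:]) if a != b)
--     return 'Yes' if distinct == 2 else 'No'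
-- ===== Notes on version B (the rewrite author's own statement) =====
-- stated objective: alternative
-- what changed: Replaces the hash-dict counting pass (answer = dict size == 2) with sort-then-adjacent-scan: sort the string once and count distinct characters as 1 + the number of adjacent unequal pairs.
import Mathlib
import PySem

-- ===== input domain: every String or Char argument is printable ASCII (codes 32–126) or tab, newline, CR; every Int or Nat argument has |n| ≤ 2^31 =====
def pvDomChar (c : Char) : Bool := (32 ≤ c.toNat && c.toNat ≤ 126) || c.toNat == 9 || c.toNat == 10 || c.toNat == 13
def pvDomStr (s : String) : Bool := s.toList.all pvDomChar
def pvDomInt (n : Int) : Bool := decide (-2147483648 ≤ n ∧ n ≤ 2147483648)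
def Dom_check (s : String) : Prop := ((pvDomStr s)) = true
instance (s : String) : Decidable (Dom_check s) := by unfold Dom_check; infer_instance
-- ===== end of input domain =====

-- B replaces A's hash-dict counting pass with sort-then-adjacent-scan (alternative decomposition, same result).


-- ===== PORT A =====
-- for alphabet in s: if not word_dict.get(alphabet): word_dict[alphabet] = 1 else: word_dict[alphabet] += 1
-- (`not word_dict.get(c)` is true when the key is missing (None) or its value is 0: `getD c 0 == 0` covers both exactly)
def check (s : String) : String :=
  let word_dict : PySem.Dict Char Int :=
    s.toList.foldl
      (fun d c =>
        if d.getD c 0 == 0 then d.insert c 1 else d.insert c (d.getD c 0 + 1))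
      PySem.Dict.empty
  if word_dict.size == 2 then "Yes" else "No"

-- ===== PORT B =====
-- sum(1 for a, b in zip(t, t[1:]) if a != b)
def check_alt_diffs (t : List Char) : Nat :=
  ((t.zip t.tail).filter (fun p => !(p.1 == p.2))).length

def check_alt (s : String) : String :=
  let t := PySem.List.sorted s.toList (fun c => c) false
  let distinct : Nat := if t = [] then 0 else 1 + check_alt_diffs t
  if distinct = 2 then "Yes" else "No"

-- ===== PRECONDITION & SPEC =====
def Spec_check (s : String) (out : String) : Prop := out = check_alt s
instance (s : String) (out : String) : Decidable (Spec_check s out) := by unfold Spec_check; infer_instance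

-- ===== CLAIM (what is proved, stated in full; the proofs are below) =====
def Claim_equal_check : Prop := ∀ (s : String), Dom_check s → Spec_check s (check s)

-- ===== LEMMAS AND PROOFS =====

-- length of the dedup set, cons cases via permutation of Nodup lists
theorem pv_setLen_cons_mem {x : Char} {xs : List Char} (h : x ∈ xs) :
    (PySem.Set.ofList (x :: xs)).length = (PySem.Set.ofList xs).length := by
  have hperm : (PySem.Set.ofList (x :: xs)).Perm (PySem.Set.ofList xs) := by
    rw [List.perm_ext_iff_of_nodup (PySem.Set.nodup_ofList _) (PySem.Set.nodup_ofList _)]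
    intro y
    simp only [PySem.Set.mem_ofList, List.mem_cons]
    constructor
    · rintro (rfl | hy)
      · exact h
      · exact hy
    · exact Or.inr
  exact hperm.length_eq

theorem pv_setLen_cons_not_mem {x : Char} {xs : List Char} (h : x ∉ xs) :
    (PySem.Set.ofList (x :: xs)).length = 1 + (PySem.Set.ofList xs).length := by
  have hperm : (PySem.Set.ofList (x :: xs)).Perm (x :: PySem.Set.ofList xs) := by
    rw [List.perm_ext_iff_of_nodup (PySem.Set.nodup_ofList _)]
    · intro y
      simp [PySem.Set.mem_ofList, List.mem_cons]
    · exact List.nodup_cons.mpr ⟨by simpa [PySem.Set.mem_ofList] using h, PySem.Set.nodup_ofList _⟩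
  simp [hperm.length_eq, Nat.add_comm]

theorem pv_diffs_cons (a b : Char) (r : List Char) :
    check_alt_diffs (a :: b :: r) =
      (if a = b then 0 else 1) + check_alt_diffs (b :: r) := by
  simp only [check_alt_diffs, List.tail_cons, List.zip_cons_cons, List.filter_cons]
  by_cases h : a = b <;> simp [h, Nat.add_comm]

-- on a ≤-sorted list, 1 + number of adjacent unequal pairs = number of distinct elements
theorem pv_runs (t : List Char) (hs : t.Pairwise (· ≤ ·)) :
    (if t = [] then 0 else 1 + check_alt_diffs t) = (PySem.Set.ofList t).length := by
  induction t with
  | nil => simp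
  | cons a t ih =>
    cases t with
    | nil => simp [check_alt_diffs, PySem.Set.ofList]
    | cons b r =>
      have hab : a ≤ b := (List.pairwise_cons.mp hs).1 b (by simp)
      have hs' : (b :: r).Pairwise (· ≤ ·) := (List.pairwise_cons.mp hs).2
      have ih' := ih hs'
      simp only [reduceCtorEq, if_false] at ih' ⊢
      rw [pv_diffs_cons]
      by_cases hab' : a = b
      · subst hab'
        rw [pv_setLen_cons_mem (by simp)]
        simpa using ih'
      · have hnot : a ∉ b :: r := by
          intro hmem
          rcases List.mem_cons.mp hmem with rfl | hmem
          · exact hab' rfl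
          · have hbley : b ≤ a := (List.pairwise_cons.mp hs').1 a hmem
            exact hab' (le_antisymm hab hbley)
        rw [pv_setLen_cons_not_mem hnot, ← ih']
        simp [hab']
  
-- sorting does not change the set of elements, hence not the distinct count
theorem pv_setLen_sorted (l : List Char) :
    (PySem.Set.ofList (PySem.List.sorted l (fun c => c) false)).length =
      (PySem.Set.ofList l).length := by
  have hperm : (PySem.Set.ofList (PySem.List.sorted l (fun c => c) false)).Perm
      (PySem.Set.ofList l) := by
    rw [List.perm_ext_iff_of_nodup (PySem.Set.nodup_ofList _) (PySem.Set.nodup_ofList _)]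
    intro y
    simp [PySem.Set.mem_ofList, PySem.List.mem_sorted]
  exact hperm.length_eq

-- A's dict has exactly the distinct characters of s as keys
theorem pv_dict_size (l : List Char) :
    (l.foldl
      (fun (d : PySem.Dict Char Int) c =>
        if d.getD c 0 == 0 then d.insert c 1 else d.insert c (d.getD c 0 + 1))
      PySem.Dict.empty).size = (PySem.Set.ofList l).length := by
  have hstep : (fun (d : PySem.Dict Char Int) c =>
      if d.getD c 0 == 0 then d.insert c 1 else d.insert c (d.getD c 0 + 1)) =
      (fun (d : PySem.Dict Char Int) c =>
        d.insert c (if d.getD c 0 == 0 then 1 else d.getD c 0 + 1)) := by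
    funext d c
    by_cases h : d.getD c 0 == 0 <;> simp [h]
  rw [hstep]
  have hkeys := PySem.Dict.keys_foldl_insert (l := l)
    (f := fun (d : PySem.Dict Char Int) c => if d.getD c 0 == 0 then 1 else d.getD c 0 + 1)
    (d := PySem.Dict.empty)
  simp only [PySem.Dict.keys_empty, PySem.Set.update_nil_left] at hkeys
  have hsz : ∀ (d : PySem.Dict Char Int), d.size = d.keys.length := by
    intro d; simp [PySem.Dict.size, PySem.Dict.keys]
  rw [hsz, hkeys]

-- ===== VERDICT (by name: the statement is the Claim_ definition above) =====
theorem check_spec : Claim_equal_check := by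
  intro s _
  unfold Spec_check check check_alt
  have hA := pv_dict_size s.toList
  have hB := pv_runs (PySem.List.sorted s.toList (fun c => c) false)
    (PySem.List.sorted_pairwise _ _)
  rw [pv_setLen_sorted] at hB
  simp only [hA, hB]
  by_cases h : (PySem.Set.ofList s.toList).length = 2 <;> simp [h]
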